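-- pv_equiv track=rewrite | github.com/mctraore/Data-Structures-and-Algorithms | Graphs/escape_the_ghosts.py | pacman
-- ===== SOURCE A (Python) =====
-- def distance(target, start):
--   total = 0
--   row_dist = abs(target[0]- start[0])
--   col_dist = abs(target[1]- start[1])
--   total = row_dist + col_dist
--   return total
--
-- def pacman(target, ghosts):
--   closest_ghost = float('inf')
--   for ghost in ghosts:
--     dist= distance(target, ghost)
--     if dist < closest_ghost:
--       closest_ghost = dist
--
--   player_dist = distance(target, [0,0])
--
--   return player_dist < closest_ghost
-- ===== SOURCE B (Python) =====
-- def pacman(target, ghosts):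
--     dists = sorted(abs(target[0] - g[0]) + abs(target[1] - g[1]) for g in ghosts)
--     if not dists:
--         return True
--     return abs(target[0]) + abs(target[1]) < dists[0]
-- ===== Notes on version B (the rewrite author's own statement) =====
-- stated objective: alternative
-- what changed: Replaces the running-minimum scan over ghost distances with a staged map-then-sort: build the list of all ghost Manhattan distances, sort it, and compare the player's distance against the sorted head (empty list means True); no minimum accumulator or float('inf') sentinel.
-- outside the precondition, e.g. on pacman([1], [[0, 0]]): A raises IndexError, B raises IndexError
import Mathlib
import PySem

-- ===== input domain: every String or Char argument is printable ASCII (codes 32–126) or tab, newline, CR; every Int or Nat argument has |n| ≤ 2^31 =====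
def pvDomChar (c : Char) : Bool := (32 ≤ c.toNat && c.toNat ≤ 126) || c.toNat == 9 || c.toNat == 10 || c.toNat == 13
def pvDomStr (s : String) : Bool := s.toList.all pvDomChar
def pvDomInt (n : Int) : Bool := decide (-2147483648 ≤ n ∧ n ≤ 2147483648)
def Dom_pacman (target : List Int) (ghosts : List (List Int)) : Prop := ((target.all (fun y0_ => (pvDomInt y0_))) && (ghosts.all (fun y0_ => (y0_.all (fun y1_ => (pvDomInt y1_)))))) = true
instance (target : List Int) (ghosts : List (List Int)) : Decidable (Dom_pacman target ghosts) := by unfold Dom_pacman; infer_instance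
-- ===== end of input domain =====

-- B replaces A's running-minimum scan with map-then-sort: build all ghost distances,
-- sort them, and compare the player's distance with the sorted head; objective: alternative.

-- ===== PORT A =====
-- distance(target, start): Manhattan distance between the first two coordinates.
-- Indexing is exact on inputs satisfying Pre_ (both lists have ≥ 2 elements).
def distA (target start : List Int) : Int :=
  let row_dist := |((PySem.List.pyGet? target 0).getD 0) - ((PySem.List.pyGet? start 0).getD 0)|
  let col_dist := |((PySem.List.pyGet? target 1).getD 0) - ((PySem.List.pyGet? start 1).getD 0)|
  row_dist + col_dist

-- closest_ghost starts as float('inf'); modelled as Option Int with none = inf.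
def pacman (target : List Int) (ghosts : List (List Int)) : Bool :=
  let closest_ghost := ghosts.foldl
    (fun closest ghost =>
      let dist := distA target ghost
      if (match closest with | none => true | some c => decide (dist < c)) then some dist
      else closest)
    (none : Option Int)
  let player_dist := distA target [0, 0]
  match closest_ghost with
  | none => true
  | some c => decide (player_dist < c)

-- ===== PORT B =====
def pacman_alt (target : List Int) (ghosts : List (List Int)) : Bool :=
  let dists := PySem.List.sorted
    (ghosts.map (fun g =>
      |((PySem.List.pyGet? target 0).getD 0) - ((PySem.List.pyGet? g 0).getD 0)|
      + |((PySem.List.pyGet? target 1).getD 0) - ((PySem.List.pyGet? g 1).getD 0)|))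
    (fun x => x) false
  match dists with
  | [] => true
  | m :: _ =>
      decide (|(PySem.List.pyGet? target 0).getD 0| + |(PySem.List.pyGet? target 1).getD 0| < m)

-- ===== PRECONDITION & SPEC =====
-- Pre_ excludes exactly the inputs on which A raises IndexError: target or some ghost
-- with fewer than 2 coordinates.
def Pre_pacman (target : List Int) (ghosts : List (List Int)) : Prop :=
  2 ≤ target.length ∧ ∀ g ∈ ghosts, 2 ≤ g.length
instance (target : List Int) (ghosts : List (List Int)) : Decidable (Pre_pacman target ghosts) := by
  unfold Pre_pacman; infer_instance
def pvWitness_pacman : List Int × List (List Int) := ([2, 3], [[5, 1], [-1, -2]])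

def Spec_pacman (target : List Int) (ghosts : List (List Int)) (out : Bool) : Prop := out = pacman_alt target ghosts
instance (target : List Int) (ghosts : List (List Int)) (out : Bool) : Decidable (Spec_pacman target ghosts out) := by unfold Spec_pacman; infer_instance

-- ===== CLAIM (what is proved, stated in full; the proofs are below) =====
def Claim_equal_pacman : Prop := ∀ (target : List Int) (ghosts : List (List Int)), Dom_pacman target ghosts → Pre_pacman target ghosts → Spec_pacman target ghosts (pacman target ghosts)

-- ===== LEMMAS AND PROOFS =====

-- A's final comparison against the running minimum equals the conjunction of the
-- comparisons against each ghost distance (and against the initial accumulator).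
theorem pacman_loop_all (target : List Int) (p : Int) (ghosts : List (List Int))
    (c : Option Int) :
    (match ghosts.foldl
        (fun closest ghost =>
          let dist := distA target ghost
          if (match closest with | none => true | some c => decide (dist < c)) then some dist
          else closest) c with
      | none => true
      | some m => decide (p < m))
    = ((match c with | none => true | some m => decide (p < m))
        && ghosts.all (fun g => decide (p < distA target g))) := by
  induction ghosts generalizing c with
  | nil => simp
  | cons g gs ih =>
    simp only [List.foldl_cons, List.all_cons, ih]
    cases c with
    | none => simp
    | some m =>
      by_cases h : distA target g < m
      · simp [h]
        exact fun hp _ => lt_trans hp h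
      · simp only [h, decide_false]
        simp only [Bool.false_eq_true, if_false]
        by_cases hp : p < m
        · have : p < distA target g := lt_of_lt_of_le hp (le_of_not_gt h)
          simp [hp, this]
        · simp [hp]

theorem distA_player (target : List Int) :
    distA target [0, 0]
      = |(PySem.List.pyGet? target 0).getD 0| + |(PySem.List.pyGet? target 1).getD 0| := by
  simp [distA, PySem.List.pyGet?, PySem.List.pyIdx?]

-- B's comparison with the head of the sorted distance list equals the conjunction of
-- the comparisons against each distance.
theorem sorted_head_all (ds : List Int) (p : Int) :
    (match PySem.List.sorted ds (fun x => x) false with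
      | [] => true
      | m :: _ => decide (p < m))
    = ds.all (fun d => decide (p < d)) := by
  rcases h : PySem.List.sorted ds (fun x => x) false with _ | ⟨m, t⟩
  · have : ds = [] := (PySem.List.sorted_eq_nil_iff ds (fun x => x) false).1 h
    simp [this]
  · have hmin : ∀ y ∈ ds, m ≤ y := PySem.List.key_head_sorted_le ds (fun x => x) h
    have hmem : m ∈ ds := by
      have : m ∈ PySem.List.sorted ds (fun x => x) false := by simp [h]
      exact (PySem.List.mem_sorted ds (fun x => x) false m).1 this
    by_cases hp : p < m
    · have hall : ds.all (fun d => decide (p < d)) = true :=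
        List.all_eq_true.mpr (fun d hd => decide_eq_true (lt_of_lt_of_le hp (hmin d hd)))
      rw [hall]; exact decide_eq_true hp
    · have hall : ds.all (fun d => decide (p < d)) = false :=
        List.all_eq_false.mpr ⟨m, hmem, by simp [hp]⟩
      rw [hall]; exact decide_eq_false hp

-- ===== VERDICT (by name: the statement is the Claim_ definition above) =====
theorem pacman_spec : Claim_equal_pacman := by
  intro target ghosts _ _
  unfold Spec_pacman pacman pacman_alt
  simp only []
  rw [pacman_loop_all target (distA target [0, 0]) ghosts none, distA_player,
      sorted_head_all, List.all_map]
  rfl
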